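/- GENERATED by mk_final_copies.py from the proof of the farm's unit `decode_residue.7b` (farm:decode_residue.7b.1: Proof.lean) as the
   re-elaboration sweep compiled it — do not edit. -/
import Vorbis.Spec.Units.decode_residue_7b
import Vorbis.Spec.Worked.decode_residue_7b_Lemmas

open X86 X86.User Asan Vorbis Vorbis.Spec Vorbis.Spec.DecodeResidue

/-- Unit `decode_residue.7b`: DECODE_RAW of DECODE expansion #2 (0x10f36f … 0x10f40d: the fast table, the call of
`codebook_decode_scalar_raw`, the inline path), as the walk `seg_b` of Lemmas.lean (the worker of decode_residue.7, attempt 1). -/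
theorem Vorbis.Spec.Worked.decode_residue_7b_ok : Vorbis.Spec.decode_residue_7b.Statement := by
  intro Lay hLay μ hμ u₀ hcode h_load8 h_load1 h_load4 h_load2 h_scalar
  intro g hent cs pcount v hat s hm
  exact Vorbis.Spec.decode_residue_7b.seg_b Lay hLay μ hμ u₀ hcode h_load8 h_load1 h_load4 h_load2 h_scalar g hent cs pcount v hat s hm
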